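-- pv_equiv track=rewrite | github.com/DmitriiBGalkin/DecisionTreeExperiment | survey/Tree Change.py | merge_styles
-- ===== SOURCE A (Python) =====
-- def parse_style(style_text: str) -> list[tuple[str, str]]:
--     """
--     Parse a style string into a list of (prop_lower, value_stripped) in order encountered.
--     Ignores empty items; keeps raw value (case/spacing preserved except ends).
--     """
--     result = []
--     for chunk in style_text.split(";"):
--         if not chunk.strip():
--             continue
--         if ":" not in chunk:
--             continue
--         prop, val = chunk.split(":", 1)
--         prop = prop.strip().lower()
--         val = val.strip()
--         result.append((prop, val))
--     return result
--
-- def merge_styles(style_values: list[str]) -> str: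
--     """
--     Merge multiple style attribute values. Later declarations override earlier ones (CSS behavior).
--     Keeps property order by last occurrence.
--     """
--     order = []
--     seen = set()
--     merged = {}
--     for s in style_values:
--         for prop, val in parse_style(s):
--             merged[prop] = val
--             if prop in seen:
--                 # move prop to the end of order
--                 order = [p for p in order if p != prop]
--             else:
--                 seen.add(prop)
--             order.append(prop)
--     if not order:
--         return ""
--     return "; ".join(f"{p}: {merged[p]}" for p in order) + ";"
-- ===== SOURCE B (Python) =====
-- def parse_style(style_text: str) -> list[tuple[str, str]]:
--     result = []
--     for chunk in style_text.split(";"):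
--         if not chunk.strip():
--             continue
--         if ":" not in chunk:
--             continue
--         prop, val = chunk.split(":", 1)
--         result.append((prop.strip().lower(), val.strip()))
--     return result
--
-- def merge_styles(style_values: list[str]) -> str:
--     # Insertion-ordered dict: delete + re-insert moves a repeated property to
--     # the end, so the dict's own order IS the last-occurrence order.
--     merged = {}
--     for s in style_values:
--         for prop, val in parse_style(s):
--             if prop in merged:
--                 del merged[prop]
--             merged[prop] = val
--     if not merged:
--         return ""
--     return "; ".join(f"{p}: {v}" for p, v in merged.items()) + ";"
-- ===== Notes on version B (the rewrite author's own statement) =====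
-- stated objective: simpler
-- what changed: A maintains a separate order list (rebuilt by a full list comprehension on every repeated property) plus a seen set beside the dict; B keeps one insertion-ordered dict and moves a repeated property to the end by delete-then-reinsert, so the dict's own iteration order is the last-occurrence order.
import Mathlib
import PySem

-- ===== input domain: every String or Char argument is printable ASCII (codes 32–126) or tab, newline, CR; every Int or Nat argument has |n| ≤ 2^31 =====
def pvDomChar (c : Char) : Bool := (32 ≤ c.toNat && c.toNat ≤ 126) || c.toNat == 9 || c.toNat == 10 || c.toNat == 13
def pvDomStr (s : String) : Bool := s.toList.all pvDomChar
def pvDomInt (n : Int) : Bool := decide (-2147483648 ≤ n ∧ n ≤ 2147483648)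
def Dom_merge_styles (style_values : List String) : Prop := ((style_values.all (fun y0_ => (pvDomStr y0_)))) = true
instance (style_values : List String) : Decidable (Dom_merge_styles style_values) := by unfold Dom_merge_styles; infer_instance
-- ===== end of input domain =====

-- B replaces A's side list `order` (rebuilt by a list comprehension on every repeated
-- property) plus `seen` set by a single insertion-ordered dict with delete-then-reinsert.

-- ===== PORT A =====
-- shared helper: both Pythons contain the identical parse_style
def parse_style (style_text : String) : List (String × String) :=
  ((PySem.Str.split? style_text ";").getD []).foldl (fun result chunk =>
    if PySem.Str.strip chunk = "" then result
    else if PySem.Str.isIn ":" chunk = false then result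
    else
      match PySem.Str.splitMax? chunk ":" 1 with
      | some (prop :: val :: _) =>
          result ++ [(PySem.Str.lower (PySem.Str.strip prop), PySem.Str.strip val)]
      | _ => result) []

-- body of A's inner loop over parse_style s: state (order, seen, merged)
def mergeStepA (st : List String × PySem.Set String × PySem.Dict String String)
    (pv : String × String) : List String × PySem.Set String × PySem.Dict String String :=
  let (order, seen, merged) := st
  let merged := merged.insert pv.1 pv.2
  if PySem.Set.contains seen pv.1 then
    (order.filter (fun p => p != pv.1) ++ [pv.1], seen, merged)
  else
    (order ++ [pv.1], PySem.Set.add seen pv.1, merged)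

def merge_styles (style_values : List String) : String :=
  let st := style_values.foldl
    (fun st s => (parse_style s).foldl mergeStepA st)
    (([], PySem.Set.empty, PySem.Dict.empty) : List String × PySem.Set String × PySem.Dict String String)
  if st.1 = [] then ""
  else PySem.Str.join "; " (st.1.map (fun p => p ++ ": " ++ PySem.Dict.getD st.2.2 p "")) ++ ";"

-- ===== PORT B =====
-- body of B's inner loop: delete-then-reinsert into the one ordered dict
def mergeStepB (merged : PySem.Dict String String) (pv : String × String) :
    PySem.Dict String String :=
  let merged := if merged.contains pv.1 then merged.erase pv.1 else merged
  merged.insert pv.1 pv.2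

def merge_styles_alt (style_values : List String) : String :=
  let merged := style_values.foldl
    (fun merged s => (parse_style s).foldl mergeStepB merged)
    (PySem.Dict.empty : PySem.Dict String String)
  if merged.items = [] then ""
  else PySem.Str.join "; " (merged.items.map (fun pv => pv.1 ++ ": " ++ pv.2)) ++ ";"

-- ===== PRECONDITION & SPEC =====
def Spec_merge_styles (style_values : List String) (out : String) : Prop := out = merge_styles_alt style_values
instance (style_values : List String) (out : String) : Decidable (Spec_merge_styles style_values out) := by unfold Spec_merge_styles; infer_instance

-- ===== CLAIM (what is proved, stated in full; the proofs are below) =====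
def Claim_equal_merge_styles : Prop := ∀ (style_values : List String), Dom_merge_styles style_values → Spec_merge_styles style_values (merge_styles style_values)

-- ===== LEMMAS AND PROOFS =====

-- the relation between A's loop state and B's dict that both loops preserve:
-- B's items are A's order list paired with A's merged values, and A's seen set
-- holds exactly the members of A's order list
def MergeInv (st : List String × PySem.Set String × PySem.Dict String String)
    (d : PySem.Dict String String) : Prop :=
  d.items = st.1.map (fun p => (p, PySem.Dict.getD st.2.2 p "")) ∧
  (∀ x, PySem.Set.contains st.2.1 x = decide (x ∈ st.1))

theorem mergeInv_step (st : List String × PySem.Set String × PySem.Dict String String)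
    (d : PySem.Dict String String) (pv : String × String) (h : MergeInv st d) :
    MergeInv (mergeStepA st pv) (mergeStepB d pv) := by
  obtain ⟨order, seen, merged⟩ := st
  obtain ⟨hitems, hseen⟩ := h
  simp only at hitems hseen
  have hcont : d.contains pv.1 = decide (pv.1 ∈ order) := by
    simp [PySem.Dict.contains, hitems, List.any_map, Function.comp_def, List.any_beq',
      List.contains_eq_mem]
  by_cases hk : pv.1 ∈ order
  · have hks : pv.1 ∈ seen := by
      have := hseen pv.1; simp [List.contains_eq_mem, hk] at this; exact this
    have hA : mergeStepA (order, seen, merged) pv =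
        (order.filter (fun p => p != pv.1) ++ [pv.1], seen, merged.insert pv.1 pv.2) := by
      simp [mergeStepA, List.contains_eq_mem, hks]
    have hBe : (d.erase pv.1).contains pv.1 = false := by
      simp [PySem.Dict.erase, PySem.Dict.contains, List.any_filter]
    have hB : mergeStepB d pv = PySem.Dict.mk
        ((d.items.filter (fun p => !(p.1 == pv.1))) ++ [(pv.1, pv.2)]) := by
      simp only [mergeStepB, hcont, hk, decide_true, if_pos]
      simp [PySem.Dict.insert, PySem.Dict.erase]
    rw [hA, hB]
    constructor
    · show _ = List.map _ (order.filter (fun p => p != pv.1) ++ [pv.1])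
      simp only [hitems, List.filter_map, List.map_append, List.map_cons, List.map_nil]
      congr 1
      · apply List.map_congr_left
        intro p hp
        have hpne : p ≠ pv.1 := by simpa using (List.of_mem_filter hp)
        simp [PySem.Dict.getD_insert, hpne]
      · simp
    · intro x
      simp only [hseen x]
      by_cases hx : x = pv.1
      · subst hx; simp [hk]
      · simp [hx, List.mem_filter]
  · have hns : pv.1 ∉ seen := by
      have := hseen pv.1; simp [List.contains_eq_mem, hk] at this; exact this
    have hA : mergeStepA (order, seen, merged) pv =
        (order ++ [pv.1], PySem.Set.add seen pv.1, merged.insert pv.1 pv.2) := by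
      simp [mergeStepA, List.contains_eq_mem, hns]
    have hB : mergeStepB d pv = PySem.Dict.mk (d.items ++ [(pv.1, pv.2)]) := by
      simp only [mergeStepB, hcont, hk, decide_false, Bool.false_eq_true]
      simp [PySem.Dict.insert, hcont, hk]
    rw [hA, hB]
    constructor
    · show _ = List.map _ (order ++ [pv.1])
      simp only [hitems, List.map_append, List.map_cons, List.map_nil]
      congr 1
      · apply List.map_congr_left
        intro p hp
        have hpne : p ≠ pv.1 := fun he => hk (he ▸ hp)
        simp [PySem.Dict.getD_insert, hpne]
      · simp
    · intro x
      have hxm : (x ∈ seen) ↔ x ∈ order := by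
        simpa [PySem.Set.contains, List.contains_eq_mem] using hseen x
      show PySem.Set.contains (PySem.Set.add seen pv.1) x = _
      simp [PySem.Set.add, PySem.Set.contains, hns, List.contains_eq_mem, List.mem_append, hxm]

theorem mergeInv_foldl (l : List (String × String))
    (st : List String × PySem.Set String × PySem.Dict String String)
    (d : PySem.Dict String String) (h : MergeInv st d) :
    MergeInv (l.foldl mergeStepA st) (l.foldl mergeStepB d) := by
  induction l generalizing st d with
  | nil => exact h
  | cons p t ih => exact ih _ _ (mergeInv_step st d p h)

theorem mergeInv_outer (ss : List String)
    (st : List String × PySem.Set String × PySem.Dict String String)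
    (d : PySem.Dict String String) (h : MergeInv st d) :
    MergeInv (ss.foldl (fun st s => (parse_style s).foldl mergeStepA st) st)
      (ss.foldl (fun d s => (parse_style s).foldl mergeStepB d) d) := by
  induction ss generalizing st d with
  | nil => exact h
  | cons s t ih => exact ih _ _ (mergeInv_foldl (parse_style s) st d h)

-- ===== VERDICT (by name: the statement is the Claim_ definition above) =====
theorem merge_styles_spec : Claim_equal_merge_styles := by
  intro style_values _
  show merge_styles style_values = merge_styles_alt style_values
  have h0 : MergeInv ([], PySem.Set.empty, PySem.Dict.empty) PySem.Dict.empty :=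
    ⟨rfl, fun _ => rfl⟩
  have h := mergeInv_outer style_values _ _ h0
  set stA := style_values.foldl (fun st s => (parse_style s).foldl mergeStepA st)
    (([], PySem.Set.empty, PySem.Dict.empty) : List String × PySem.Set String × PySem.Dict String String) with hstA
  set dB := style_values.foldl (fun d s => (parse_style s).foldl mergeStepB d)
    (PySem.Dict.empty : PySem.Dict String String) with hdB
  obtain ⟨hitems, -⟩ := h
  show (if stA.1 = [] then ""
      else PySem.Str.join "; " (stA.1.map (fun p => p ++ ": " ++ PySem.Dict.getD stA.2.2 p "")) ++ ";") =
    (if dB.items = [] then ""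
      else PySem.Str.join "; " (dB.items.map (fun pv => pv.1 ++ ": " ++ pv.2)) ++ ";")
  rw [hitems]
  simp [List.map_map, Function.comp_def]
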